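-- pv_equiv track=rewrite | github.com/aviesena/Price-House | run.py | chart2
-- ===== SOURCE A (Python) =====
-- from collections import defaultdict
--
-- def chart2(data_dict):
--     sales_by_year = defaultdict(int)
--     total_sales_by_year = defaultdict(int)
--
--     for row in data_dict:
--         year_sold = row['YrSold']
--         sales_by_year[year_sold] += 1
--         total_sales_by_year[year_sold] += row['SalePrice']  # Gantilah 'TotalSales' dengan nama kolom yang sesuai
--
--     labels = list(sales_by_year.keys())
--     values = list(total_sales_by_year.values())
--
--     return labels, values
-- ===== SOURCE B (Python) =====
-- def chart2(data_dict):
--     labels = []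
--     for row in data_dict:
--         year = row['YrSold']
--         if year not in labels:
--             labels.append(year)
--     values = [sum(row['SalePrice'] for row in data_dict if row['YrSold'] == year)
--               for year in labels]
--     return labels, values
-- ===== Notes on version B (the rewrite author's own statement) =====
-- stated objective: alternative
-- what changed: A keeps two parallel running-accumulator defaultdicts (count and total) in one loop; B uses no dict at all: it first collects the distinct years in first-occurrence order, then computes each year's total by re-scanning the rows with a per-year filtered sum.
import Mathlib
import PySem

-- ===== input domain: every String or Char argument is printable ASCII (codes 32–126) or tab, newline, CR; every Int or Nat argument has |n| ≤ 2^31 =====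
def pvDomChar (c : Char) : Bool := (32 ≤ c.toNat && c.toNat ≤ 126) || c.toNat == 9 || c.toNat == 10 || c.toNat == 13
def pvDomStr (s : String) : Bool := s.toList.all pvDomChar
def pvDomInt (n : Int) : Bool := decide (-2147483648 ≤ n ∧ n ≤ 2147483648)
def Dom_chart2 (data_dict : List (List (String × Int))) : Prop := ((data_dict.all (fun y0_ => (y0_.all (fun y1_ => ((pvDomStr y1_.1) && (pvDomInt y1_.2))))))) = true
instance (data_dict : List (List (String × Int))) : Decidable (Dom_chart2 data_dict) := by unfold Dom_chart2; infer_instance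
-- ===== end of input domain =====

-- B replaces A's single loop with two parallel running-accumulator dicts by a staged
-- algorithm with no dict at all: first collect the distinct years in first-occurrence
-- order, then for each year re-scan the rows summing its SalePrice values.

-- ===== PORT A =====
-- rows are Python dicts: List (String × Int) association lists, lookup = first match
-- (none = KeyError, excluded by Pre_chart2)
def chart2Loop (rows : List (List (String × Int)))
    (sales_by_year total_sales_by_year : PySem.Dict Int Int) :
    Option (PySem.Dict Int Int × PySem.Dict Int Int) :=
  match rows with
  | [] => some (sales_by_year, total_sales_by_year)
  | row :: rest =>
    match (PySem.Dict.mk row).get? "YrSold", (PySem.Dict.mk row).get? "SalePrice" with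
    | some year_sold, some price =>
        chart2Loop rest
          (sales_by_year.insert year_sold (sales_by_year.getD year_sold 0 + 1))
          (total_sales_by_year.insert year_sold (total_sales_by_year.getD year_sold 0 + price))
    | _, _ => none

def chart2 (data_dict : List (List (String × Int))) : List Int × List Int :=
  match chart2Loop data_dict PySem.Dict.empty PySem.Dict.empty with
  | some (sales_by_year, total_sales_by_year) =>
      (sales_by_year.keys, total_sales_by_year.values)
  | none => ([], [])    -- unreachable under Pre_chart2 (KeyError in Python)

-- ===== PORT B =====
-- first pass: labels = distinct years in first-occurrence order
def chart2Labels (rows : List (List (String × Int))) (labels : List Int) :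
    Option (List Int) :=
  match rows with
  | [] => some labels
  | row :: rest =>
    match (PySem.Dict.mk row).get? "YrSold" with
    | some year => chart2Labels rest (if labels.contains year then labels else labels ++ [year])
    | none => none

-- sum(row['SalePrice'] for row in rows if row['YrSold'] == year)
def chart2SumFor (rows : List (List (String × Int))) (year : Int) : Option Int :=
  match rows with
  | [] => some 0
  | row :: rest =>
    match (PySem.Dict.mk row).get? "YrSold" with
    | none => none
    | some y =>
      if y == year then
        match (PySem.Dict.mk row).get? "SalePrice" with
        | none => none
        | some price => (chart2SumFor rest year).map (price + ·)
      else chart2SumFor rest year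

-- the list comprehension over labels
def chart2Values (rows : List (List (String × Int))) (labels : List Int) :
    Option (List Int) :=
  match labels with
  | [] => some []
  | year :: more =>
    match chart2SumFor rows year, chart2Values rows more with
    | some v, some vs => some (v :: vs)
    | _, _ => none

def chart2_alt (data_dict : List (List (String × Int))) : List Int × List Int :=
  match chart2Labels data_dict [] with
  | none => ([], [])    -- unreachable under Pre_chart2 (KeyError in Python)
  | some labels =>
    match chart2Values data_dict labels with
    | none => ([], [])  -- unreachable under Pre_chart2 (KeyError in Python)
    | some values => (labels, values)

-- ===== PRECONDITION & SPEC =====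
-- Pre_chart2 excludes exactly the rows missing a 'YrSold' or 'SalePrice' key, on which
-- the Python A raises KeyError.
def Pre_chart2 (data_dict : List (List (String × Int))) : Prop :=
  (data_dict.all (fun row =>
    ((PySem.Dict.mk row).get? "YrSold").isSome &&
    ((PySem.Dict.mk row).get? "SalePrice").isSome)) = true
instance (data_dict : List (List (String × Int))) : Decidable (Pre_chart2 data_dict) := by
  unfold Pre_chart2; infer_instance

def pvWitness_chart2 : (List (List (String × Int))) :=
  [[("YrSold", 2008), ("SalePrice", 180000)], [("YrSold", 2007), ("SalePrice", 95000)],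
   [("YrSold", 2008), ("SalePrice", 40000)]]

def Spec_chart2 (data_dict : List (List (String × Int))) (out : List Int × List Int) : Prop := out = chart2_alt data_dict
instance (data_dict : List (List (String × Int))) (out : List Int × List Int) : Decidable (Spec_chart2 data_dict out) := by unfold Spec_chart2; infer_instance

-- ===== CLAIM (what is proved, stated in full; the proofs are below) =====
def Claim_equal_chart2 : Prop := ∀ (data_dict : List (List (String × Int))), Dom_chart2 data_dict → Pre_chart2 data_dict → Spec_chart2 data_dict (chart2 data_dict)

-- ===== LEMMAS AND PROOFS =====

-- proof-side total versions (only used under Pre_chart2, where the get?s are some)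
def yrKey (row : List (String × Int)) : Int := ((PySem.Dict.mk row).get? "YrSold").getD 0
def prKey (row : List (String × Int)) : Int := ((PySem.Dict.mk row).get? "SalePrice").getD 0

def yrsAcc (rows : List (List (String × Int))) (ys : List Int) : List Int :=
  match rows with
  | [] => ys
  | row :: rest => yrsAcc rest (if ys.contains (yrKey row) then ys else ys ++ [yrKey row])

def sumAcc (rows : List (List (String × Int))) (y : Int) : Int :=
  match rows with
  | [] => 0
  | row :: rest => (if yrKey row == y then prKey row else 0) + sumAcc rest y

def hasKeys (row : List (String × Int)) : Bool :=
  ((PySem.Dict.mk row).get? "YrSold").isSome && ((PySem.Dict.mk row).get? "SalePrice").isSome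

theorem contains_eq_keys_contains (d : PySem.Dict Int Int) (y : Int) :
    d.contains y = d.keys.contains y := by
  rw [PySem.Dict.contains_eq_decide_mem_keys]
  simp

-- A's loop: returns `some`, keys grow like yrsAcc, totals grow like sumAcc, nodup kept
theorem loopA_char (rows : List (List (String × Int)))
    (s t : PySem.Dict Int Int) (hpre : rows.all hasKeys = true)
    (hkeys : s.keys = t.keys) (hnd : t.keys.Nodup) :
    ∃ s' t', chart2Loop rows s t = some (s', t') ∧
      s'.keys = yrsAcc rows t.keys ∧ t'.keys = yrsAcc rows t.keys ∧
      t'.keys.Nodup ∧ (∀ y, t'.getD y 0 = t.getD y 0 + sumAcc rows y) := by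
  induction rows generalizing s t with
  | nil =>
    exact ⟨s, t, rfl, by simpa [yrsAcc] using hkeys, rfl, hnd, fun y => by simp [sumAcc]⟩
  | cons row rest ih =>
    simp only [List.all_cons, Bool.and_eq_true, hasKeys] at hpre
    obtain ⟨⟨hy, hp⟩, hrest⟩ := hpre
    obtain ⟨y, hy⟩ := Option.isSome_iff_exists.mp hy
    obtain ⟨p, hp⟩ := Option.isSome_iff_exists.mp hp
    have hyk : yrKey row = y := by simp [yrKey, hy]
    have hpk : prKey row = p := by simp [prKey, hp]
    have hkeys' : (s.insert y (s.getD y 0 + 1)).keys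
        = (t.insert y (t.getD y 0 + p)).keys := by
      by_cases hc : t.contains y = true
      · rw [PySem.Dict.keys_insert_of_contains _ _ (by
            rw [PySem.Dict.contains_eq_decide_mem_keys] at hc ⊢
            rwa [hkeys]),
          PySem.Dict.keys_insert_of_contains _ _ hc, hkeys]
      · have hc' : s.contains y = false := by
          rw [PySem.Dict.contains_eq_decide_mem_keys] at hc ⊢
          rw [hkeys]; simpa using hc
        rw [PySem.Dict.keys_insert_of_not_contains _ _ hc',
          PySem.Dict.keys_insert_of_not_contains _ _ (by simpa using hc), hkeys]
    obtain ⟨s', t', heq, hs', ht', hnd', hgd⟩ :=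
      ih (s.insert y (s.getD y 0 + 1)) (t.insert y (t.getD y 0 + p)) hrest hkeys'
        (PySem.Dict.nodup_keys_insert _ _ _ hnd)
    refine ⟨s', t', ?_, ?_, ?_, hnd', ?_⟩
    · rw [chart2Loop, hy, hp]; exact heq
    · rw [hs']
      show _ = yrsAcc rest _
      rw [hyk]
      congr 1
      by_cases hc : t.contains y = true
      · rw [PySem.Dict.keys_insert_of_contains _ _ hc,
          if_pos (by rw [← contains_eq_keys_contains]; exact hc)]
      · rw [PySem.Dict.keys_insert_of_not_contains _ _ (by simpa using hc),
          if_neg (by rw [← contains_eq_keys_contains]; simp [hc])]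
    · rw [ht']
      show _ = yrsAcc rest _
      rw [hyk]
      congr 1
      by_cases hc : t.contains y = true
      · rw [PySem.Dict.keys_insert_of_contains _ _ hc,
          if_pos (by rw [← contains_eq_keys_contains]; exact hc)]
      · rw [PySem.Dict.keys_insert_of_not_contains _ _ (by simpa using hc),
          if_neg (by rw [← contains_eq_keys_contains]; simp [hc])]
    · intro z
      rw [hgd z, PySem.Dict.getD_insert]
      show _ = _ + ((if yrKey row == z then prKey row else 0) + sumAcc rest z)
      rw [hyk, hpk]
      by_cases hz : z = y
      · subst hz; simp; omega
      · simp [hz, Ne.symm hz]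

-- B's first pass computes yrsAcc
theorem labels_char (rows : List (List (String × Int))) (ys : List Int)
    (hpre : rows.all hasKeys = true) :
    chart2Labels rows ys = some (yrsAcc rows ys) := by
  induction rows generalizing ys with
  | nil => rfl
  | cons row rest ih =>
    simp only [List.all_cons, Bool.and_eq_true, hasKeys] at hpre
    obtain ⟨⟨hy, _⟩, hrest⟩ := hpre
    obtain ⟨y, hy⟩ := Option.isSome_iff_exists.mp hy
    have hyk : yrKey row = y := by simp [yrKey, hy]
    rw [chart2Labels, hy, yrsAcc, hyk]
    exact ih _ hrest

-- B's per-year sum computes sumAcc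
theorem sumFor_char (rows : List (List (String × Int))) (y : Int)
    (hpre : rows.all hasKeys = true) :
    chart2SumFor rows y = some (sumAcc rows y) := by
  induction rows with
  | nil => rfl
  | cons row rest ih =>
    simp only [List.all_cons, Bool.and_eq_true, hasKeys] at hpre
    obtain ⟨⟨hyk, hpk⟩, hrest⟩ := hpre
    obtain ⟨yr, hyr⟩ := Option.isSome_iff_exists.mp hyk
    obtain ⟨p, hp⟩ := Option.isSome_iff_exists.mp hpk
    rw [chart2SumFor, hyr]
    show (if yr == y then _ else _) = some ((if yrKey row == y then prKey row else 0) + sumAcc rest y)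
    rw [ih hrest]
    by_cases h : yr = y
    · simp [h, hp, yrKey, prKey, hyr]
    · simp [h, yrKey, hyr]

-- B's comprehension maps sumAcc over the labels
theorem values_char (rows : List (List (String × Int))) (ys : List Int)
    (hpre : rows.all hasKeys = true) :
    chart2Values rows ys = some (ys.map (fun y => sumAcc rows y)) := by
  induction ys with
  | nil => rfl
  | cons y more ih => rw [chart2Values, sumFor_char rows y hpre, ih]; rfl

-- ===== VERDICT (by name: the statement is the Claim_ definition above) =====
theorem chart2_spec : Claim_equal_chart2 := by
  intro data_dict _ hpre
  show chart2 data_dict = chart2_alt data_dict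
  obtain ⟨s', t', heq, hs', ht', hnd', hgd⟩ :=
    loopA_char data_dict PySem.Dict.empty PySem.Dict.empty hpre rfl (by simp)
  unfold chart2 chart2_alt
  rw [heq, labels_char data_dict [] hpre]
  dsimp only
  rw [values_char data_dict (yrsAcc data_dict []) hpre]
  dsimp only
  have hkeys0 : (PySem.Dict.empty : PySem.Dict Int Int).keys = [] := rfl
  rw [hkeys0] at hs' ht'
  rw [PySem.Dict.values_eq_map_keys t' hnd' 0, hs', ht']
  congr 1
  apply List.map_congr_left
  intro y _
  rw [hgd y]
  simp [PySem.Dict.getD_empty]
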